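-- pv_equiv track=rewrite | github.com/stevencmiller/ai-learning-personalizer | diagnostic_engine/math/math_diagnostic_scoring.py | assess_math_mastery_by_strand
-- ===== SOURCE A (Python) =====
-- def assess_math_mastery_by_strand(scores_dict):
--     """
--     Assigns mastery levels based on percent scores per math strand.
--     Levels:
--     - Mastered: 90–100
--     - In Progress: 70–89
--     - Not Yet Mastered: < 70
--     """
--     mastery_results = {}
--     for strand, score in scores_dict.items():
--         if score >= 90:
--             mastery_results[strand] = "Mastered"
--         elif score >= 70:
--             mastery_results[strand] = "In Progress"
--         else:
--             mastery_results[strand] = "Not Yet Mastered"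
--     return mastery_results
-- ===== SOURCE B (Python) =====
-- # Threshold-table lookup instead of an if/elif cascade: binary-search the sorted
-- # thresholds and index a parallel label list.
-- _THRESHOLDS = [70, 90]
-- _LABELS = ["Not Yet Mastered", "In Progress", "Mastered"]
--
--
-- def _bisect_right(a, x, lo, hi):
--     # insertion point for x in sorted list a (rightmost), like bisect.bisect_right
--     while lo < hi:
--         mid = (lo + hi) // 2
--         if x < a[mid]:
--             hi = mid
--         else:
--             lo = mid + 1
--     return lo
--
--
-- def assess_math_mastery_by_strand(scores_dict):
--     return {strand: _LABELS[_bisect_right(_THRESHOLDS, score, 0, len(_THRESHOLDS))]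
--             for strand, score in scores_dict.items()}
-- ===== Notes on version B (the rewrite author's own statement) =====
-- stated objective: idiomatic
-- what changed: Replaces the if/elif/else cascade with a sorted-threshold table plus a parallel label list, picking each strand's label by the binary-search insertion point (bisect_right) of its score in the table, built as a dict comprehension.
import Mathlib
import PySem

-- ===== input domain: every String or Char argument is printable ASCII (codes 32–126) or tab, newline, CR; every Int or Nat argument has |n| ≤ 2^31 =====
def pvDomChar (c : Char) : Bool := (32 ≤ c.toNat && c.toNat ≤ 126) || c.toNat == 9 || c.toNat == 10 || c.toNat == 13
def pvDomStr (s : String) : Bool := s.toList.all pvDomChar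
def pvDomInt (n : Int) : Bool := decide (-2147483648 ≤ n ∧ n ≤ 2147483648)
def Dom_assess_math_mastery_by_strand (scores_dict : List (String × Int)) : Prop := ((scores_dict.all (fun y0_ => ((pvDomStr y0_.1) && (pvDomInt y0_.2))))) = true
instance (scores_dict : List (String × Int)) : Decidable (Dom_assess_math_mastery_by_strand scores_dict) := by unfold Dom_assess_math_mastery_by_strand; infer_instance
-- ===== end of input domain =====

-- B replaces A's if/elif/else cascade with a sorted-threshold table and a
-- binary-search (bisect_right) lookup into a parallel label list (objective: idiomatic).

-- ===== PORT A =====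
def assess_math_mastery_by_strand (scores_dict : List (String × Int)) : List (String × String) :=
  (scores_dict.foldl
    (fun (mastery_results : PySem.Dict String String) p =>
      if p.2 ≥ 90 then mastery_results.insert p.1 "Mastered"
      else if p.2 ≥ 70 then mastery_results.insert p.1 "In Progress"
      else mastery_results.insert p.1 "Not Yet Mastered")
    PySem.Dict.empty).items

-- ===== PORT B =====
def pvThresholds : List Int := [70, 90]
def pvLabels : List String := ["Not Yet Mastered", "In Progress", "Mastered"]

-- hand-written bisect_right from Source B, ported step for step
-- (the while loop runs at most hi - lo times, used as structural fuel)
def pvBisectRightAux (a : List Int) (x : Int) : Nat → Nat → Nat → Nat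
  | 0, lo, _ => lo
  | fuel + 1, lo, hi =>
    if lo < hi then
      let mid := (lo + hi) / 2
      if x < a.getD mid 0 then pvBisectRightAux a x fuel lo mid
      else pvBisectRightAux a x fuel (mid + 1) hi
    else lo

def pvBisectRight (a : List Int) (x : Int) (lo hi : Nat) : Nat :=
  pvBisectRightAux a x (hi - lo) lo hi

def assess_math_mastery_by_strand_alt (scores_dict : List (String × Int)) : List (String × String) :=
  (scores_dict.foldl
    (fun (d : PySem.Dict String String) p =>
      -- _LABELS[idx]: idx = bisect_right result is always ≤ 2, in range, so getD is exact
      d.insert p.1 (pvLabels.getD (pvBisectRight pvThresholds p.2 0 pvThresholds.length) ""))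
    PySem.Dict.empty).items

-- ===== PRECONDITION & SPEC =====
def Spec_assess_math_mastery_by_strand (scores_dict : List (String × Int)) (out : List (String × String)) : Prop := out = assess_math_mastery_by_strand_alt scores_dict
instance (scores_dict : List (String × Int)) (out : List (String × String)) : Decidable (Spec_assess_math_mastery_by_strand scores_dict out) := by unfold Spec_assess_math_mastery_by_strand; infer_instance

-- ===== CLAIM (what is proved, stated in full; the proofs are below) =====
def Claim_equal_assess_math_mastery_by_strand : Prop := ∀ (scores_dict : List (String × Int)), Dom_assess_math_mastery_by_strand scores_dict → Spec_assess_math_mastery_by_strand scores_dict (assess_math_mastery_by_strand scores_dict)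

-- ===== LEMMAS AND PROOFS =====

theorem pvLabel_eq (x : Int) :
    pvLabels.getD (pvBisectRight pvThresholds x 0 pvThresholds.length) "" =
      (if x ≥ 90 then "Mastered" else if x ≥ 70 then "In Progress" else "Not Yet Mastered") := by
  by_cases h90 : x < 90
  · by_cases h70 : x < 70
    · simp [pvBisectRight, pvBisectRightAux, pvThresholds, pvLabels, ge_iff_le,
        h90, h70, not_le.mpr h90, not_le.mpr h70]
    · simp [pvBisectRight, pvBisectRightAux, pvThresholds, pvLabels, ge_iff_le,
        h90, h70, not_le.mpr h90, not_lt.mp h70]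
  · have h70 : ¬ x < 70 := by omega
    simp [pvBisectRight, pvBisectRightAux, pvThresholds, pvLabels, ge_iff_le,
      h90, not_lt.mp h90]

-- ===== VERDICT (by name: the statement is the Claim_ definition above) =====
theorem assess_math_mastery_by_strand_spec : Claim_equal_assess_math_mastery_by_strand := by
  intro scores_dict _
  unfold Spec_assess_math_mastery_by_strand assess_math_mastery_by_strand assess_math_mastery_by_strand_alt
  have hstep :
      (fun (mastery_results : PySem.Dict String String) (p : String × Int) =>
        if p.2 ≥ 90 then mastery_results.insert p.1 "Mastered"
        else if p.2 ≥ 70 then mastery_results.insert p.1 "In Progress"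
        else mastery_results.insert p.1 "Not Yet Mastered") =
      (fun (d : PySem.Dict String String) (p : String × Int) =>
        d.insert p.1 (pvLabels.getD (pvBisectRight pvThresholds p.2 0 pvThresholds.length) "")) := by
    funext d p
    rw [pvLabel_eq]
    split_ifs <;> rfl
  rw [hstep]
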